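-- pv_equiv track=rewrite | github.com/PLSE-Lab/Python-MLAPI-expl | python_sources/mathurin-week3-prevision1.py | days_ago_thresold_hit
-- ===== SOURCE A (Python) =====
-- def days_ago_thresold_hit(full_array, indx, thresold):
--         days_ago_confirmed_count_10=-1
--         if full_array[indx]>thresold: # if currently the count of confirmed is more than 10
--             for j in range (indx,-1,-1):
--                 entered=False
--                 if full_array[j]<=thresold:
--                     days_ago_confirmed_count_10=abs(j-indx)
--                     entered=True
--                     break
--                 if entered==False:
--                     days_ago_confirmed_count_10=100 #this value would we don;t know it cross 0
--         return days_ago_confirmed_count_10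
-- ===== SOURCE B (Python) =====
-- def days_ago_thresold_hit(full_array, indx, thresold):
--     if full_array[indx] <= thresold:
--         return -1
--     hits = [j for j in range(indx + 1) if full_array[j] <= thresold]
--     return indx - max(hits) if hits else 100
-- ===== Notes on version B (the rewrite author's own statement) =====
-- stated objective: simpler
-- what changed: Replaces A's backward early-exit scan with break/sentinel bookkeeping by a forward filter collecting all indices <= threshold and a single max reduction (indx - max(hits), 100 if none).
-- outside the precondition, e.g. on days_ago_thresold_hit([5], -1, 3): A returns -1, B returns 100
import Mathlib
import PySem

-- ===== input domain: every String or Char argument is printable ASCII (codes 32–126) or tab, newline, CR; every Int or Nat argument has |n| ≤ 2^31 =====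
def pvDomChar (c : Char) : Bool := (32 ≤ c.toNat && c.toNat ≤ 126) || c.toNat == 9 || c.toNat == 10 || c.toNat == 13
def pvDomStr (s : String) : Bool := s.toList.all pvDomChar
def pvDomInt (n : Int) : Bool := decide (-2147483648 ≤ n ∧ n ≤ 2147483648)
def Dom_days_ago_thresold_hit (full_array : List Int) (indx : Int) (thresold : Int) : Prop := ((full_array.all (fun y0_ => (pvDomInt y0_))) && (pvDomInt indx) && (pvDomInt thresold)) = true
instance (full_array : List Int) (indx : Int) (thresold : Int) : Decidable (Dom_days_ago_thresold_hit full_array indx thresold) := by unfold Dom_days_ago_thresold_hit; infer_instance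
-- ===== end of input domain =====

-- B replaces A's backward early-exit scan by a forward collect-then-max pass (objective: simpler decomposition, same cost).

-- ===== PORT A =====
-- A's backward loop 'for j in range(indx,-1,-1)': break with abs(j-indx) at the first hit, else acc becomes 100
def pvLoopA (full_array : List Int) (indx : Int) (thresold : Int) : List Int → Int → Int
  | [], acc => acc
  | j :: rest, _ =>
      if PySem.List.pyGetD full_array j 0 ≤ thresold then |j - indx|
      else pvLoopA full_array indx thresold rest 100

def days_ago_thresold_hit (full_array : List Int) (indx : Int) (thresold : Int) : Int :=
  let days_ago : Int := -1
  if thresold < PySem.List.pyGetD full_array indx 0 then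
    pvLoopA full_array indx thresold (PySem.List.pyRange indx (-1) (-1)) days_ago
  else days_ago

-- ===== PORT B =====
def days_ago_thresold_hit_alt (full_array : List Int) (indx : Int) (thresold : Int) : Int :=
  if PySem.List.pyGetD full_array indx 0 ≤ thresold then -1
  else
    let hits := (PySem.List.pyRange 0 (indx + 1) 1).filter
      (fun j => PySem.List.pyGetD full_array j 0 ≤ thresold)
    match PySem.List.max? hits (fun y => y) with
    | some m => indx - m
    | none => 100

-- ===== PRECONDITION & SPEC =====
-- Pre_ excludes out-of-range indices, where A raises IndexError, and negative in-range indx whose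
-- element exceeds the threshold: there A's backward loop range(indx,-1,-1) is empty and the -1 it
-- returns is an artefact of the loop bound, a defensible-corner accident B does not reproduce.
def Pre_days_ago_thresold_hit (full_array : List Int) (indx : Int) (thresold : Int) : Prop :=
  PySem.Raise.InRange full_array.length indx ∧
    (0 ≤ indx ∨ PySem.List.pyGetD full_array indx 0 ≤ thresold)
instance (full_array : List Int) (indx : Int) (thresold : Int) : Decidable (Pre_days_ago_thresold_hit full_array indx thresold) := by unfold Pre_days_ago_thresold_hit; infer_instance

def pvWitness_days_ago_thresold_hit : List Int × Int × Int := ([1, 5], 1, 3)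

def Spec_days_ago_thresold_hit (full_array : List Int) (indx : Int) (thresold : Int) (out : Int) : Prop := out = days_ago_thresold_hit_alt full_array indx thresold
instance (full_array : List Int) (indx : Int) (thresold : Int) (out : Int) : Decidable (Spec_days_ago_thresold_hit full_array indx thresold out) := by unfold Spec_days_ago_thresold_hit; infer_instance

-- ===== CLAIM (what is proved, stated in full; the proofs are below) =====
def Claim_equal_days_ago_thresold_hit : Prop := ∀ (full_array : List Int) (indx : Int) (thresold : Int), Dom_days_ago_thresold_hit full_array indx thresold → Pre_days_ago_thresold_hit full_array indx thresold → Spec_days_ago_thresold_hit full_array indx thresold (days_ago_thresold_hit full_array indx thresold)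

-- ===== LEMMAS AND PROOFS =====

-- First hit of A's countdown scan from n equals the max of the forward hit table over [0, n].
lemma pvScan_eq_max (full_array : List Int) (indx thresold : Int) (n : Nat) (acc : Int) :
    pvLoopA full_array indx thresold (PySem.List.pyRange (n : Int) (-1) (-1)) acc =
      match PySem.List.max?
          ((PySem.List.pyRange 0 ((n : Int) + 1) 1).filter
            (fun j => PySem.List.pyGetD full_array j 0 ≤ thresold)) (fun y => y) with
      | some m => |m - indx|
      | none => 100 := by
  induction n generalizing acc with
  | zero =>
      simp only [Nat.cast_zero, zero_add]
      have hr : PySem.List.pyRange 0 (-1) (-1) = [0] := by decide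
      have hf : PySem.List.pyRange 0 1 1 = [(0 : Int)] := by decide
      rw [hr, hf]
      by_cases h : PySem.List.pyGetD full_array 0 0 ≤ thresold
      · simp [pvLoopA, h, PySem.List.max?]
      · simp [pvLoopA, h, PySem.List.max?]
  | succ k ih =>
      rw [PySem.List.pyRange_neg_one_cons (by omega)]
      have hsplit : PySem.List.pyRange 0 ((k : Int) + 1 + 1) 1 =
          PySem.List.pyRange 0 ((k : Int) + 1) 1 ++ [(k : Int) + 1] :=
        PySem.List.pyRange_one_succ_right (by omega)
      push_cast
      rw [hsplit]
      by_cases h : PySem.List.pyGetD full_array ((k : Int) + 1) 0 ≤ thresold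
      · -- hit at the head: max of the filtered list is k+1
        simp only [pvLoopA, h, if_pos, List.filter_append]
        have hfl : List.filter (fun j => decide (PySem.List.pyGetD full_array j 0 ≤ thresold))
            [(k : Int) + 1] = [(k : Int) + 1] := by simp [List.filter, h]
        rw [hfl]
        set L := (PySem.List.pyRange 0 ((k : Int) + 1) 1).filter
          (fun j => decide (PySem.List.pyGetD full_array j 0 ≤ thresold)) with hL
        have hne : L ++ [(k : Int) + 1] ≠ [] := by simp
        obtain ⟨m, hm⟩ : ∃ m, PySem.List.max? (L ++ [(k : Int) + 1]) (fun y => y) = some m := by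
          rcases hmm : PySem.List.max? (L ++ [(k : Int) + 1]) (fun y => y) with _ | m
          · exact absurd ((PySem.List.max?_eq_none_iff _ _).mp hmm) hne
          · exact ⟨m, rfl⟩
        have hmem := PySem.List.max?_mem hm
        have hmax := PySem.List.max?_isMax hm ((k : Int) + 1) (by simp)
        have hmeq : m = (k : Int) + 1 := by
          rcases List.mem_append.mp hmem with hmL | hml
          · have := PySem.List.mem_pyRange_one.mp (List.mem_filter.mp (hL ▸ hmL)).1
            omega
          · simpa using hml
        rw [hm, hmeq]
      · -- no hit at the head: drop it on both sides and use the IH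
        simp only [pvLoopA, h, List.filter_append]
        have hfl : List.filter (fun j => decide (PySem.List.pyGetD full_array j 0 ≤ thresold))
            [(k : Int) + 1] = [] := by simp [List.filter, h]
        rw [hfl, List.append_nil]
        simpa using ih 100

theorem days_ago_thresold_hit_spec : Claim_equal_days_ago_thresold_hit := by
  intro full_array indx thresold _ hpre
  obtain ⟨_, hor⟩ := hpre
  unfold Spec_days_ago_thresold_hit days_ago_thresold_hit days_ago_thresold_hit_alt
  by_cases h : PySem.List.pyGetD full_array indx 0 ≤ thresold
  · simp [h, not_lt.mpr h]
  · have h0 : 0 ≤ indx := hor.resolve_right h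
    have hlt : thresold < PySem.List.pyGetD full_array indx 0 := lt_of_not_ge h
    simp only [h, hlt, if_pos, if_neg, not_false_iff]
    obtain ⟨n, hn⟩ : ∃ n : Nat, indx = (n : Int) := ⟨indx.toNat, (Int.toNat_of_nonneg h0).symm⟩
    subst hn
    rw [pvScan_eq_max full_array n thresold n (-1)]
    rcases hmm : PySem.List.max?
        ((PySem.List.pyRange 0 ((n : Int) + 1) 1).filter
          (fun j => PySem.List.pyGetD full_array j 0 ≤ thresold)) (fun y => y) with _ | m
    · rfl
    · have hmem := PySem.List.max?_mem hmm
      have hmr := PySem.List.mem_pyRange_one.mp (List.mem_filter.mp hmem).1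
      show |m - (n : Int)| = (n : Int) - m
      rw [abs_of_nonpos (by omega)]; ring
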